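-- pv_equiv track=rewrite | github.com/kissmikijr/aoc | 2021/day20/part1.py | extend_matrix
-- ===== SOURCE A (Python) =====
-- def extend_matrix(image, times, i):
--     image = [[x for x in y] for y in image]
--     pixel_to_extend = "#" if i % 2 == 0 else "."
--     for _ in range(times):
--         start_image = []
--         for x in image:
--             x.insert(0, pixel_to_extend)
--             x.append(pixel_to_extend)
--             start_image.append(x)
--
--         black_row = [pixel_to_extend] * (len(image[0]))
--         start_image.insert(0, black_row)
--         start_image.append(black_row)
--         image = [[x for x in y] for y in start_image]
--     return image
-- ===== SOURCE B (Python) =====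
-- def extend_matrix(image, times, i):
--     pad = "#" if i % 2 == 0 else "."
--     t = max(times, 0)
--     if t == 0:
--         return [list(row) for row in image]
--     side = [pad] * t
--     full = [pad] * (len(image[0]) + 2 * t)
--     return ([full[:] for _ in range(t)]
--             + [side + list(row) + side for row in image]
--             + [full[:] for _ in range(t)])
-- ===== Notes on version B (the rewrite author's own statement) =====
-- stated objective: faster
-- what changed: B builds the final padded matrix directly in one pass (t full border rows plus each row padded with t cells per side) instead of A's loop that re-pads and deep-copies the whole growing matrix `times` times.
import Mathlib
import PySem

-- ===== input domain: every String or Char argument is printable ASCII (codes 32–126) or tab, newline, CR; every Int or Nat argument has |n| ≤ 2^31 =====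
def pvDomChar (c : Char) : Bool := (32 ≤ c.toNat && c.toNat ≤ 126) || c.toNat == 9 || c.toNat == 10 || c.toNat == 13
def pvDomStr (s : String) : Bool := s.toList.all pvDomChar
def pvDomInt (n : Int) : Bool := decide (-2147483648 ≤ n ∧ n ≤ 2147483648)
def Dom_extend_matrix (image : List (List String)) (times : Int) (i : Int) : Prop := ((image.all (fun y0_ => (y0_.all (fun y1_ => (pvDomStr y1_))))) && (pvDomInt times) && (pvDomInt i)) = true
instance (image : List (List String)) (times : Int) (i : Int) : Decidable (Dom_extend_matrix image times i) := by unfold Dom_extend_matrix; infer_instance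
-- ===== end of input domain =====

-- B builds the final padded matrix directly in one pass instead of A's repeated re-pad-and-deep-copy loop; equivalence is about the return value (A mutates only its own local copies).

-- ===== PORT A =====
-- one iteration of A's `for _ in range(times)` body
def pvStepA (p : String) (img : List (List String)) : List (List String) :=
  let start_image := img.foldl (fun acc x => acc ++ [[p] ++ x ++ [p]]) []
  -- black_row = [pixel]*len(image[0]); A's insert/append mutate the row objects of `image`
  -- in place, so image[0] is exactly start_image's first row; the IndexError this line
  -- raises on an empty image is excluded by Pre_
  let black_row := List.replicate (PySem.List.pyGetD start_image 0 ([] : List String)).length p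
  let start_image := [black_row] ++ start_image ++ [black_row]
  start_image.map (fun y => y.map (fun x => x))

def extend_matrix (image : List (List String)) (times : Int) (i : Int) : List (List String) :=
  let image0 := image.map (fun y => y.map (fun x => x))
  let pixel_to_extend := if PySem.Int.mod i 2 = 0 then "#" else "."
  (PySem.List.pyRange 0 times 1).foldl (fun img _ => pvStepA pixel_to_extend img) image0

-- ===== PORT B =====
def extend_matrix_alt (image : List (List String)) (times : Int) (i : Int) : List (List String) :=
  let pad := if PySem.Int.mod i 2 = 0 then "#" else "."
  let t := max times 0
  if t = 0 then image.map (fun row => row.map (fun x => x))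
  else
    let tn := t.toNat
    let side := List.replicate tn pad
    let full := List.replicate ((PySem.List.pyGetD image 0 ([] : List String)).length + 2 * tn) pad
    List.replicate tn full
      ++ image.map (fun row => side ++ row.map (fun x => x) ++ side)
      ++ List.replicate tn full

-- ===== PRECONDITION & SPEC =====
-- Pre_ excludes only the inputs where A raises: times >= 1 with an empty image hits
-- image[0] (IndexError); B raises there too.
def Pre_extend_matrix (image : List (List String)) (times : Int) (i : Int) : Prop :=
  times ≤ 0 ∨ image ≠ []
instance (image : List (List String)) (times : Int) (i : Int) : Decidable (Pre_extend_matrix image times i) := by unfold Pre_extend_matrix; infer_instance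

def pvWitness_extend_matrix : List (List String) × Int × Int := ([["a", "b"], ["c", "d"]], 2, 3)

def Spec_extend_matrix (image : List (List String)) (times : Int) (i : Int) (out : List (List String)) : Prop := out = extend_matrix_alt image times i
instance (image : List (List String)) (times : Int) (i : Int) (out : List (List String)) : Decidable (Spec_extend_matrix image times i out) := by unfold Spec_extend_matrix; infer_instance

-- ===== CLAIM (what is proved, stated in full; the proofs are below) =====
def Claim_equal_extend_matrix : Prop := ∀ (image : List (List String)) (times : Int) (i : Int), Dom_extend_matrix image times i → Pre_extend_matrix image times i → Spec_extend_matrix image times i (extend_matrix image times i)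

-- ===== LEMMAS AND PROOFS =====

theorem pvFoldlAppendSingleton {α β : Type} (f : α → β) :
    ∀ (l : List α) (acc : List β), l.foldl (fun acc x => acc ++ [f x]) acc = acc ++ l.map f := by
  intro l
  induction l with
  | nil => simp
  | cons x xs ih => intro acc; simp [List.foldl_cons, ih, List.append_assoc]
-- the shape after n iterations of A's loop body, on a nonempty image
def pvPadded (p : String) (r0 : List String) (rs : List (List String)) (n : Nat) : List (List String) :=
  List.replicate n (List.replicate (r0.length + 2 * n) p)
    ++ (r0 :: rs).map (fun r => List.replicate n p ++ r ++ List.replicate n p)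
    ++ List.replicate n (List.replicate (r0.length + 2 * n) p)
theorem pvReplSandwich {α : Type} (p : α) (k : Nat) :
    [p] ++ List.replicate k p ++ [p] = List.replicate (k + 2) p := by
  rw [List.append_assoc, ← List.replicate_succ', List.singleton_append, ← List.replicate_succ]
theorem pvPadMid {α : Type} (p : α) (r : List α) (n : Nat) :
    [p] ++ (List.replicate n p ++ r ++ List.replicate n p) ++ [p]
      = List.replicate (n + 1) p ++ r ++ List.replicate (n + 1) p := by
  have h : List.replicate n p ++ [p] = p :: List.replicate n p :=
    (List.replicate_succ' (a:=p) (n:=n)).symm.trans (List.replicate_succ (a:=p) (n:=n))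
  simp [List.append_assoc, h, List.replicate_succ]
theorem pvReplicateComm {α : Type} (x : α) (n : Nat) :
    List.replicate n x ++ [x] = x :: List.replicate n x :=
  (List.replicate_succ' (a:=x) (n:=n)).symm.trans (List.replicate_succ (a:=x) (n:=n))
theorem pvStepA_pad (p : String) (r0 : List String) (rs : List (List String)) (n : Nat) :
    pvStepA p (pvPadded p r0 rs n) = pvPadded p r0 rs (n + 1) := by
  have h2 : r0.length + 2 * (n + 1) = r0.length + 2 * n + 2 := by ring
  have hcomp : ((fun x => [p] ++ x ++ [p]) ∘ (fun r : List String => List.replicate n p ++ r ++ List.replicate n p))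
      = (fun r => List.replicate (n + 1) p ++ r ++ List.replicate (n + 1) p) :=
    funext fun r => pvPadMid p r n
  have hmap : (pvPadded p r0 rs n).map (fun x => [p] ++ x ++ [p])
      = List.replicate n (List.replicate (r0.length + 2 * n + 2) p)
        ++ (r0 :: rs).map (fun r => List.replicate (n + 1) p ++ r ++ List.replicate (n + 1) p)
        ++ List.replicate n (List.replicate (r0.length + 2 * n + 2) p) := by
    unfold pvPadded
    simp only [List.map_append, List.map_replicate, List.map_map, hcomp]
    rw [pvReplSandwich]
  have hhead : (PySem.List.pyGetD ((pvPadded p r0 rs n).map (fun x => [p] ++ x ++ [p])) 0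
      ([] : List String)).length = r0.length + 2 * n + 2 := by
    rw [hmap]
    cases n with
    | zero => simp [PySem.List.pyGetD_zero, List.replicate_succ]
    | succ m => simp [PySem.List.pyGetD_zero, List.replicate_succ]
  simp only [pvStepA]
  rw [pvFoldlAppendSingleton, List.nil_append, hhead, hmap]
  rw [show pvPadded p r0 rs (n+1)
      = List.replicate (n+1) (List.replicate (r0.length + 2 * n + 2) p)
        ++ (r0 :: rs).map (fun r => List.replicate (n+1) p ++ r ++ List.replicate (n+1) p)
        ++ List.replicate (n+1) (List.replicate (r0.length + 2 * n + 2) p) by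
    unfold pvPadded; rw [h2]]
  simp [List.map_id', List.replicate_succ, List.append_assoc, pvReplicateComm, Function.comp]

theorem pvIterA (p : String) (r0 : List String) (rs : List (List String)) :
    ∀ (n : Nat), (pvStepA p)^[n] (r0 :: rs) = pvPadded p r0 rs n := by
  intro n
  induction n with
  | zero => simp [pvPadded]
  | succ m ih => rw [Function.iterate_succ_apply', ih, pvStepA_pad]

theorem pvFoldlConst {α β : Type} (f : α → α) :
    ∀ (l : List β) (a : α), l.foldl (fun acc _ => f acc) a = f^[l.length] a := by
  intro l
  induction l with
  | nil => simp
  | cons x xs ih => intro a; simp [List.foldl_cons, ih, Function.iterate_succ_apply]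

-- ===== VERDICT (by name: the statement is the Claim_ definition above) =====
theorem extend_matrix_spec : Claim_equal_extend_matrix := by
  intro image times i _ hpre
  simp only [Spec_extend_matrix, extend_matrix, extend_matrix_alt]
  by_cases ht : times ≤ 0
  · rw [PySem.List.pyRange_one_eq_nil (by omega)]
    simp [max_eq_right ht]
  · have himg : image ≠ [] := by
      rcases hpre with h | h
      · omega
      · exact h
    obtain ⟨r0, rs, rfl⟩ : ∃ r0 rs, image = r0 :: rs := by
      cases image with
      | nil => exact absurd rfl himg
      | cons r0 rs => exact ⟨r0, rs, rfl⟩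
    rw [pvFoldlConst, PySem.List.length_pyRange_one]
    simp only [List.map_cons, List.map_id', sub_zero]
    rw [pvIterA]
    rw [max_eq_left (by omega), if_neg (by omega : ¬ times = 0)]
    simp [pvPadded, PySem.List.pyGetD_zero, List.append_assoc]
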